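-- pv_equiv track=rewrite | github.com/zhudaxia666/shuati | LeetCode/刷题/弹射.py | tan
-- ===== SOURCE A (Python) =====
-- def tan(line1,line2):
--     n,m=line1[0],line1[1]
--     if len(line2)==0:
--         return 0
--     if len(line2)==1:
--         return 1
--     sorted(line2)
--     count=0
--     while n>0:
--         if n>=2:
--             if line2[n-1]+line2[n-2]<m:
--                 count+=1
--             else:
--                 count+=2
--             line2.pop(n-1)
--             line2.pop(n-2)
--             n-=2
--         else:
--             count+=1
--             line2.pop()
--     return count
-- ===== SOURCE B (Python) =====
-- def tan(line1, line2):
--     n, m = line1[0], line1[1]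
--     if len(line2) < 2:
--         return len(line2)
--     if n <= 0:
--         return 0
--     start = 2 if n % 2 == 1 else 1
--     total = n % 2
--     for i in range(start, n, 2):
--         total += 1 if line2[i - 1] + line2[i] < m else 2
--     return total
-- ===== Notes on version B (the rewrite author's own statement) =====
-- stated objective: faster
-- what changed: Replaces the destructive while-loop that pops two elements from line2 per iteration (each pop shifting the tail) with a single non-mutating pass over the index pairs (i-1,i) for i in range(start,n,2); B also does not mutate line2, while A empties its first n elements.
-- crash fix: When n = line1[0] is odd with 1 <= n <= len(line2) and len(line2) >= 2, A loops forever popping (n is never decremented in its n==1 branch) until it raises IndexError('pop from empty list'); B returns the intended count (n%2 for the lone element plus 1 or 2 per pair). — e.g. on tan([3, 5], [1, 2, 3]): A raises IndexError, B returns 3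
import Mathlib
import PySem

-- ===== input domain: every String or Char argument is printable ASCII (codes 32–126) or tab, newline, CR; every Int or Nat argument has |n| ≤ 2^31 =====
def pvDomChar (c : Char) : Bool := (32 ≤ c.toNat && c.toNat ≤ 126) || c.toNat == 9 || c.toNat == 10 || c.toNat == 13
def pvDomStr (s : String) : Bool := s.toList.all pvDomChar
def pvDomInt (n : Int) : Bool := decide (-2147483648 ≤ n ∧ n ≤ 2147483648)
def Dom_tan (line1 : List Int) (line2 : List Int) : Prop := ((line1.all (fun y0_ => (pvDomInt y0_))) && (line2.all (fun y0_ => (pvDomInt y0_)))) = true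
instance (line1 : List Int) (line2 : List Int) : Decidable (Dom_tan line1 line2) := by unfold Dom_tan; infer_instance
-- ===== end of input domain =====

-- B replaces A's destructive pop-two-per-iteration while loop with one non-mutating
-- pass over the index pairs (faster; and unlike A, B does not mutate line2 — the
-- equivalence proved here is about the return value only).

-- ===== PORT A =====
-- the while loop of A: state (n, line2, count); pops at n-1 and then n-2, or a bare pop() when
-- n == 1.  fuel only makes the recursion structural; tan passes enough for every terminating run
-- (the n == 1 branch of the Python loop never decrements n and loops until its pop raises).
def tanLoop (m : Int) : Nat → Int → List Int → Int → Int
  | 0, _, _, count => count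
  | fuel + 1, n, l, count =>
    if 0 < n then
      if 2 ≤ n then
        let a := PySem.List.pyGetD l (n - 1) 0   -- line2[n-1]; in range under Pre_tan
        let b := PySem.List.pyGetD l (n - 2) 0   -- line2[n-2]; in range under Pre_tan
        let count' := if a + b < m then count + 1 else count + 2
        match PySem.List.pop? l (n - 1) with
        | some (_, l1) =>
          match PySem.List.pop? l1 (n - 2) with
          | some (_, l2) => tanLoop m fuel (n - 2) l2 count'
          | none => count'          -- IndexError in Python; unreachable under Pre_tan
        | none => count'            -- IndexError in Python; unreachable under Pre_tan
      else
        match PySem.List.pop? l with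
        | some (_, l1) => tanLoop m fuel n l1 (count + 1)
        | none => count + 1         -- IndexError (pop from empty list); unreachable under Pre_tan
    else count

def tan (line1 : List Int) (line2 : List Int) : Int :=
  let n := PySem.List.pyGetD line1 0 0
  let m := PySem.List.pyGetD line1 1 0
  if line2.length = 0 then 0
  else if line2.length = 1 then 1
  else
    let _sorted := PySem.List.sorted line2 (fun x => x)   -- A's 'sorted(line2)': result discarded
    tanLoop m (n.toNat + line2.length + 1) n line2 0

-- ===== PORT B =====
def tan_alt (line1 : List Int) (line2 : List Int) : Int :=
  let n := PySem.List.pyGetD line1 0 0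
  let m := PySem.List.pyGetD line1 1 0
  if line2.length < 2 then (line2.length : Int)
  else if n ≤ 0 then 0
  else
    let start : Int := if PySem.Int.mod n 2 = 1 then 2 else 1
    (PySem.List.pyRange start n 2).foldl
      (fun acc i =>
        acc + (if PySem.List.pyGetD line2 (i - 1) 0 + PySem.List.pyGetD line2 i 0 < m then 1 else 2))
      (PySem.Int.mod n 2)

-- ===== PRECONDITION & SPEC =====
-- Pre_tan is exactly the set of inputs on which Python A returns: line1 must have the two
-- read entries, and with len(line2) >= 2 the loop terminates normally only for n <= 0 or
-- even n <= len(line2) (odd positive n never decrements in the n==1 branch and pops until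
-- IndexError; n > len(line2) indexes out of range).
def Pre_tan (line1 : List Int) (line2 : List Int) : Prop :=
  2 ≤ line1.length ∧
  (2 ≤ line2.length →
    (PySem.List.pyGetD line1 0 0 ≤ 0 ∨
      (PySem.Int.mod (PySem.List.pyGetD line1 0 0) 2 = 0 ∧
        PySem.List.pyGetD line1 0 0 ≤ (line2.length : Int))))
instance (line1 : List Int) (line2 : List Int) : Decidable (Pre_tan line1 line2) := by unfold Pre_tan; infer_instance

def pvWitness_tan : List Int × List Int := ([4, 5], [1, 2, 3, 4])

-- When n = line1[0] is odd with 1 <= n <= len(line2) and len(line2) >= 2, A loops popping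
-- forever (n is never decremented in its n==1 branch) and raises IndexError('pop from empty
-- list'); B returns the intended count: n % 2 for the lone bottom element plus 1 or 2 per pair.
def Raises_tan (line1 : List Int) (line2 : List Int) : Prop :=
  2 ≤ line1.length ∧ 2 ≤ line2.length ∧
  1 ≤ PySem.List.pyGetD line1 0 0 ∧
  PySem.Int.mod (PySem.List.pyGetD line1 0 0) 2 = 1 ∧
  PySem.List.pyGetD line1 0 0 ≤ (line2.length : Int)
instance (line1 : List Int) (line2 : List Int) : Decidable (Raises_tan line1 line2) := by unfold Raises_tan; infer_instance
def pvRaiseWitness_tan : List Int × List Int := ([3, 5], [1, 2, 3])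
def pvRaiseWitnessOut_tan : Int := 3

def Spec_tan (line1 : List Int) (line2 : List Int) (out : Int) : Prop := out = tan_alt line1 line2
instance (line1 : List Int) (line2 : List Int) (out : Int) : Decidable (Spec_tan line1 line2 out) := by unfold Spec_tan; infer_instance

-- ===== CLAIM (what is proved, stated in full; the proofs are below) =====
def Claim_equal_tan : Prop := ∀ (line1 : List Int) (line2 : List Int), Dom_tan line1 line2 → Pre_tan line1 line2 → Spec_tan line1 line2 (tan line1 line2)
def Claim_raises_tan : Prop := (∀ (line1 : List Int) (line2 : List Int), Dom_tan line1 line2 → Raises_tan line1 line2 → ¬ Pre_tan line1 line2) ∧ (Dom_tan (pvRaiseWitness_tan.1) (pvRaiseWitness_tan.2) ∧ Raises_tan (pvRaiseWitness_tan.1) (pvRaiseWitness_tan.2) ∧ tan_alt (pvRaiseWitness_tan.1) (pvRaiseWitness_tan.2) = pvRaiseWitnessOut_tan)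

-- ===== LEMMAS AND PROOFS =====

-- weight of the pair with top index 2*j+1 (B's summand, over Nat indices)
def pairW (l : List Int) (m : Int) (j : Nat) : Int :=
  if l.getD (2 * j) 0 + l.getD (2 * j + 1) 0 < m then 1 else 2

theorem pairW_eraseIdx_top (l : List Int) (m : Int) (k : Nat) (j : Nat) (hj : j < k) :
    pairW ((l.eraseIdx (2 * k + 1)).eraseIdx (2 * k)) m j = pairW l m j := by
  unfold pairW
  have h1 : ∀ (i : Nat), i < 2 * k → ((l.eraseIdx (2 * k + 1)).eraseIdx (2 * k)).getD i 0 = l.getD i 0 := by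
    intro i hi
    simp only [List.getD_eq_getElem?_getD]
    rw [List.getElem?_eraseIdx_of_lt hi, List.getElem?_eraseIdx_of_lt (by omega)]
  rw [h1 (2 * j) (by omega), h1 (2 * j + 1) (by omega)]

theorem tanLoop_nonpos (m : Int) (fuel : Nat) (n : Int) (l : List Int) (c : Int) (h : n ≤ 0) :
    tanLoop m fuel n l c = c := by
  cases fuel <;> simp [tanLoop, show ¬ (0 : Int) < n by omega]

theorem tanLoop_eq_sum (m : Int) (k fuel : Nat) (hf : k ≤ fuel) (l : List Int) (c : Int)
    (h : 2 * k ≤ l.length) :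
    tanLoop m fuel (2 * (k : Int)) l c = c + ((List.range k).map (pairW l m)).sum := by
  induction k generalizing fuel l c with
  | zero =>
    cases fuel <;> simp [tanLoop]
  | succ k ih =>
    cases fuel with
    | zero => omega
    | succ f =>
      have hlt1 : 2 * k + 1 < l.length := by omega
      have hlt0 : 2 * k < l.length := by omega
      have e1 : (2 * ((k + 1 : Nat) : Int) - 1) = ((2 * k + 1 : Nat) : Int) := by push_cast; ring
      have e2 : (2 * ((k + 1 : Nat) : Int) - 2) = ((2 * k : Nat) : Int) := by push_cast; ring
      simp only [tanLoop]
      rw [if_pos (show (0:Int) < 2 * ((k + 1 : Nat) : Int) by push_cast; omega),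
          if_pos (show (2:Int) ≤ 2 * ((k + 1 : Nat) : Int) by push_cast; omega)]
      rw [e1, e2, PySem.List.pyGetD_natCast, PySem.List.pyGetD_natCast]
      rw [PySem.List.pop?_natCast l (2 * k + 1) hlt1]
      simp only []
      have hlt0' : 2 * k < (l.eraseIdx (2 * k + 1)).length := by
        rw [List.length_eraseIdx, if_pos hlt1]; omega
      rw [PySem.List.pop?_natCast _ (2 * k) hlt0']
      simp only []
      have e4 : ((2 * k : Nat) : Int) = 2 * (k : Int) := by push_cast; ring
      rw [e4]
      set l2 := (l.eraseIdx (2 * k + 1)).eraseIdx (2 * k) with hl2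
      have hlen2 : 2 * k ≤ l2.length := by
        rw [hl2]; simp only [List.length_eraseIdx]
        split_ifs <;> omega
      rw [ih f (by omega) l2 _ hlen2]
      have hmapeq : (List.range k).map (pairW l2 m) = (List.range k).map (pairW l m) := by
        apply List.map_congr_left
        intro j hj
        exact pairW_eraseIdx_top l m k j (List.mem_range.mp hj)
      rw [hmapeq, List.range_succ, List.map_append, List.sum_append]
      have hw : (if l.getD (2 * k + 1) 0 + l.getD (2 * k) 0 < m then c + 1 else c + 2)
          = c + pairW l m k := by
        unfold pairW
        rw [Int.add_comm (l.getD (2 * k + 1) 0) (l.getD (2 * k) 0)]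
        split_ifs <;> ring
      rw [hw]
      simp only [List.map_cons, List.map_nil, List.sum_cons, List.sum_nil]
      ring

theorem foldl_range_B (l : List Int) (m : Int) (k : Nat) (hk : 0 < k) :
    (PySem.List.pyRange 1 (2 * (k : Int)) 2).foldl
      (fun acc i =>
        acc + (if PySem.List.pyGetD l (i - 1) 0 + PySem.List.pyGetD l i 0 < m then 1 else 2)) 0
    = ((List.range k).map (pairW l m)).sum := by
  rw [PySem.List.pyRange_of_pos 1 (2 * (k : Int)) (by omega)]
  have hb : (if (1 : Int) < 2 * (k : Int) then ((2 * (k : Int) - 1 + 2 - 1) / 2).toNat else 0) = k := by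
    rw [if_pos (by omega)]
    have : (2 * (k : Int) - 1 + 2 - 1) = 2 * (k : Int) := by ring
    rw [this]
    omega
  rw [hb, PySem.List.foldl_add, List.map_map]
  have : ((fun i =>
        if PySem.List.pyGetD l (i - 1) 0 + PySem.List.pyGetD l i 0 < m then (1 : Int) else 2) ∘
        fun j : Nat => 1 + 2 * (j : Int)) = pairW l m := by
    funext j
    simp only [Function.comp]
    have e1 : (1 + 2 * (j : Int) - 1) = ((2 * j : Nat) : Int) := by push_cast; ring
    have e2 : (1 + 2 * (j : Int)) = ((2 * j + 1 : Nat) : Int) := by push_cast; ring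
    rw [e1]
    simp only [e2, PySem.List.pyGetD_natCast]
    unfold pairW
    rfl
  rw [this]
  simp

-- ===== VERDICT (by name: the statement is the Claim_ definition above) =====
theorem tan_spec : Claim_equal_tan := by
  intro line1 line2 _hdom hpre
  obtain ⟨_hlen1, hcond⟩ := hpre
  unfold Spec_tan tan tan_alt
  simp only []
  set n := PySem.List.pyGetD line1 0 0 with hn
  set m := PySem.List.pyGetD line1 1 0 with hm
  by_cases h0 : line2.length = 0
  · rw [if_pos h0, if_pos (by omega)]
    simp [h0]
  · by_cases h1 : line2.length = 1
    · rw [if_neg h0, if_pos h1, if_pos (by omega)]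
      simp [h1]
    · have hlen2 : 2 ≤ line2.length := by omega
      rw [if_neg h0, if_neg h1, if_neg (by omega)]
      rcases hcond hlen2 with hnp | ⟨heven, hle⟩
      · rw [if_pos hnp, tanLoop_nonpos m _ n line2 0 hnp]
      · by_cases hpos : n ≤ 0
        · rw [if_pos hpos, tanLoop_nonpos m _ n line2 0 hpos]
        · rw [if_neg hpos]
          obtain ⟨k, hk⟩ : ∃ k : Nat, n = 2 * (k : Int) := by
            refine ⟨((n / 2).toNat), ?_⟩
            have h2 : (2 : Int) ∣ n := by
              have := Int.emod_emod_of_dvd n (dvd_refl 2)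
              simp only [PySem.Int.mod] at heven
              rw [Int.fmod_eq_emod_of_nonneg n (by omega)] at heven
              omega
            omega
          have hk0 : 0 < k := by omega
          have hmod : PySem.Int.mod n 2 = 0 := heven
          rw [hmod, if_neg (by omega)]
          rw [hk]
          rw [tanLoop_eq_sum m k _ (by omega) line2 0 (by omega)]
          rw [foldl_range_B line2 m k hk0]
          ring
theorem tan_raises : Claim_raises_tan := by
  unfold Claim_raises_tan
  constructor
  · intro line1 line2 _hdom hr hp
    obtain ⟨_, hl2, hn1, hmod, _⟩ := hr
    rcases hp.2 hl2 with h | ⟨h0, _⟩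
    · omega
    · rw [hmod] at h0; omega
  · decide
-- self-check corollary: the raise witness itself lies outside Pre_tan
theorem pvRaiseWitness_outside_pre_ok : ¬ Pre_tan (pvRaiseWitness_tan.1) (pvRaiseWitness_tan.2) :=
  tan_raises.1 (pvRaiseWitness_tan.1) (pvRaiseWitness_tan.2) (tan_raises.2.1) (tan_raises.2.2.1)
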